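-- pv_equiv track=rewrite | github.com/ManuTorrado/FCEyN-IP | CMS2 - Imperativo/test.py | hayMesetaDeLong
-- ===== SOURCE A (Python) =====
-- def hayMesetaDeLong(l: list[int], n: int) -> bool:
--     res: bool = False
--     count: int = 0
--     x: int = 0
--
--     while (count < len(l)):
--         if (x <= count):
--             if (n == count-x+1 and todosIguales(l, x, count)):
--                 res = True
--                 break
--             x += 1
--         else:
--             count += 1
--             x = 0
--
--     return res
--
-- def todosIguales(l: list[int], i: int, j: int) -> bool:
--     res: bool = True
--     for x in range(i, j+1):
--         if (not (l[x] == l[i])):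
--             res = False
--             break
--
--     return res
-- ===== SOURCE B (Python) =====
-- def hayMesetaDeLong(l: list[int], n: int) -> bool:
--     best = 0
--     run = 0
--     prev = None
--     for v in l:
--         if prev is not None and v == prev:
--             run += 1
--         else:
--             run = 1
--         if run > best:
--             best = run
--         prev = v
--     return 1 <= n <= best
-- ===== Notes on version B (the rewrite author's own statement) =====
-- stated objective: faster
-- what changed: Replaced the cubic scan over all (start,end) windows with each window re-checked element by element by a single left-to-right pass that maintains the current and maximum equal-run lengths and finally tests 1 <= n <= max run.
import Mathlib
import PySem

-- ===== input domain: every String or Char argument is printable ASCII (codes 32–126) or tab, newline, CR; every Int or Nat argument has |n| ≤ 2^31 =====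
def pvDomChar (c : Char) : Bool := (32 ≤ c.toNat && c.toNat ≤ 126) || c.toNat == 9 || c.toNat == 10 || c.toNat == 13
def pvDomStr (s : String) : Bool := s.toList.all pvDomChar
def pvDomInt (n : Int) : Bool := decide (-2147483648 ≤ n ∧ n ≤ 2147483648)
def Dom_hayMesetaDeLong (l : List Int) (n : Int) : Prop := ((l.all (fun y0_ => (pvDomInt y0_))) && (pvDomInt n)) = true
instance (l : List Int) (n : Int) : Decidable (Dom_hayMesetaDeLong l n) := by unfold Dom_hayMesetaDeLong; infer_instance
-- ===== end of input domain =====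

-- B replaces A's cubic scan over all windows with one pass maintaining the current and maximal equal-run lengths (objective: faster, asymptotic).

-- ===== PORT A =====
-- inner for-loop of todosIguales; l[x] is always in range at every call site
-- (0 ≤ i ≤ k ≤ j < len l), so pyGetD with a dummy default is exact here.
def todosIgualesLoop (l : List Int) (i : Int) : List Int → Bool
  | [] => true
  | k :: rest =>
    if !(PySem.List.pyGetD l k 0 == PySem.List.pyGetD l i 0) then false
    else todosIgualesLoop l i rest

def todosIguales (l : List Int) (i j : Int) : Bool :=
  todosIgualesLoop l i (PySem.List.pyRange i (j + 1) 1)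

-- the while-loop of A, state (count, x); res/break become returning true
def loopA (l : List Int) (n : Int) (count x : Int) : Bool :=
  if _h : count < (l.length : Int) then
    if _hx : x ≤ count then
      if n == count - x + 1 && todosIguales l x count then true
      else loopA l n count (x + 1)
    else loopA l n (count + 1) 0
  else false
termination_by (((l.length : Int) - count).toNat, (count + 1 - x).toNat)
decreasing_by
  · apply Prod.Lex.right' <;> omega
  · apply Prod.Lex.left; omega

def hayMesetaDeLong (l : List Int) (n : Int) : Bool := loopA l n 0 0

-- ===== PORT B =====
-- one fold step: state (prev, run, best)
def stepB (s : Option Int × Int × Int) (v : Int) : Option Int × Int × Int :=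
  let run := if s.1 = some v then s.2.1 + 1 else 1
  let best := if run > s.2.2 then run else s.2.2
  (some v, run, best)

def hayMesetaDeLong_alt (l : List Int) (n : Int) : Bool :=
  let s := l.foldl stepB (none, 0, 0)
  decide (1 ≤ n ∧ n ≤ s.2.2)

-- ===== PRECONDITION & SPEC =====
def Spec_hayMesetaDeLong (l : List Int) (n : Int) (out : Bool) : Prop := out = hayMesetaDeLong_alt l n
instance (l : List Int) (n : Int) (out : Bool) : Decidable (Spec_hayMesetaDeLong l n out) := by unfold Spec_hayMesetaDeLong; infer_instance

-- ===== CLAIM (what is proved, stated in full; the proofs are below) =====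
def Claim_equal_hayMesetaDeLong : Prop := ∀ (l : List Int) (n : Int), Dom_hayMesetaDeLong l n → Spec_hayMesetaDeLong l n (hayMesetaDeLong l n)

-- ===== LEMMAS AND PROOFS =====

-- all elements of l at positions x..c equal l[x]
def constSegI (l : List Int) (x c : Int) : Prop :=
  ∀ k, x ≤ k → k ≤ c → PySem.List.pyGetD l k 0 = PySem.List.pyGetD l x 0

lemma tiLoop_bounded (l : List Int) (i b : Int) : ∀ (d : Nat) (a : Int), (b - a).toNat ≤ d →
    (todosIgualesLoop l i (PySem.List.pyRange a b 1) = true ↔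
      ∀ k, a ≤ k → k < b → PySem.List.pyGetD l k 0 = PySem.List.pyGetD l i 0) := by
  intro d
  induction d with
  | zero =>
    intro a h
    rw [PySem.List.pyRange_one_eq_nil (by omega)]
    simp only [todosIgualesLoop]
    constructor
    · intro _ k h1 h2; omega
    · intro _; trivial
  | succ d ih =>
    intro a h
    by_cases hab : a < b
    · rw [PySem.List.pyRange_one_cons hab]
      simp only [todosIgualesLoop]
      by_cases he : PySem.List.pyGetD l a 0 = PySem.List.pyGetD l i 0
      · simp only [he, beq_self_eq_true, Bool.not_true, Bool.false_eq_true, if_false]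
        rw [ih (a + 1) (by omega)]
        constructor
        · intro hrec k h1 h2
          rcases eq_or_lt_of_le h1 with rfl | hlt
          · exact he
          · exact hrec k (by omega) h2
        · intro hall k h1 h2; exact hall k (by omega) h2
      · have hbeq : (PySem.List.pyGetD l a 0 == PySem.List.pyGetD l i 0) = false := by
          simp [he]
        simp only [hbeq, Bool.not_false, if_true]
        constructor
        · intro hf; exact (Bool.false_ne_true hf).elim
        · intro hall; exact absurd (hall a le_rfl hab) he
    · rw [PySem.List.pyRange_one_eq_nil (by omega)]
      simp only [todosIgualesLoop]
      constructor
      · intro _ k h1 h2; omega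
      · intro _; trivial

lemma todosIguales_iff (l : List Int) (x c : Int) (_hx : x ≤ c) :
    todosIguales l x c = true ↔ constSegI l x c := by
  unfold todosIguales constSegI
  rw [tiLoop_bounded l x (c + 1) (c + 1 - x).toNat x le_rfl]
  constructor
  · intro h k h1 h2; exact h k h1 (by omega)
  · intro h k h1 h2; exact h k h1 (by omega)

lemma loopA_iff (l : List Int) (n : Int) (count x : Int) :
    0 ≤ x → 0 ≤ count →
    (loopA l n count x = true ↔
      ∃ c x', count ≤ c ∧ c < (l.length : Int) ∧ 0 ≤ x' ∧ x' ≤ c ∧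
        (c = count → x ≤ x') ∧ n = c - x' + 1 ∧ todosIguales l x' c = true) := by
  fun_induction loopA l n count x with
  | case1 count x hlt hxc hcond =>
    intro hx hc
    simp only [Bool.and_eq_true, beq_iff_eq] at hcond
    constructor
    · intro _
      exact ⟨count, x, le_rfl, hlt, hx, hxc, fun _ => le_rfl, by omega, hcond.2⟩
    · intro _; rfl
  | case2 count x hlt hxc hcond ih =>
    intro hx hc
    rw [ih (by omega) hc]
    constructor
    · rintro ⟨c, x', h1, h2, h3, h4, h5, h6, h7⟩
      exact ⟨c, x', h1, h2, h3, h4, fun hcc => by have := h5 hcc; omega, h6, h7⟩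
    · rintro ⟨c, x', h1, h2, h3, h4, h5, h6, h7⟩
      refine ⟨c, x', h1, h2, h3, h4, fun hcc => ?_, h6, h7⟩
      have hxx' : x ≤ x' := h5 hcc
      rcases eq_or_lt_of_le hxx' with rfl | hgt
      · exfalso
        subst hcc
        simp only [Bool.and_eq_true, beq_iff_eq, not_and] at hcond
        exact hcond (by omega) h7
      · omega
  | case3 count x hlt hxc ih =>
    intro hx hc
    rw [ih (by omega) (by omega)]
    constructor
    · rintro ⟨c, x', h1, h2, h3, h4, h5, h6, h7⟩
      exact ⟨c, x', by omega, h2, h3, h4, fun hcc => by omega, h6, h7⟩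
    · rintro ⟨c, x', h1, h2, h3, h4, h5, h6, h7⟩
      refine ⟨c, x', ?_, h2, h3, h4, fun hcc => by omega, h6, h7⟩
      omega
  | case4 count x hge =>
    intro hx hc
    constructor
    · intro hf; exact (Bool.false_ne_true hf).elim
    · rintro ⟨c, x', h1, h2, _⟩; omega

lemma A_iff (l : List Int) (n : Int) :
    hayMesetaDeLong l n = true ↔
      ∃ x c : Int, 0 ≤ x ∧ x ≤ c ∧ c < (l.length : Int) ∧ n = c - x + 1 ∧ constSegI l x c := by
  unfold hayMesetaDeLong
  rw [loopA_iff l n 0 0 le_rfl le_rfl]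
  constructor
  · rintro ⟨c, x', h1, h2, h3, h4, _, h6, h7⟩
    exact ⟨x', c, h3, h4, h2, h6, (todosIguales_iff l x' c h4).mp h7⟩
  · rintro ⟨x, c, h1, h2, h3, h4, h5⟩
    exact ⟨c, x, by omega, h3, h1, h2, fun _ => h1, h4, (todosIguales_iff l x c h2).mpr h5⟩

-- B-side invariant of the fold state (prev, run, best)
def InvB (l : List Int) : Prop :=
  (l.foldl stepB (none, 0, 0)).1 = l.getLast? ∧
  0 ≤ (l.foldl stepB (none, 0, 0)).2.1 ∧ 0 ≤ (l.foldl stepB (none, 0, 0)).2.2 ∧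
  (∀ m : Int, 1 ≤ m →
    (m ≤ (l.foldl stepB (none, 0, 0)).2.1 ↔
      m ≤ (l.length : Int) ∧ constSegI l ((l.length : Int) - m) ((l.length : Int) - 1))) ∧
  (∀ m : Int, 1 ≤ m →
    (m ≤ (l.foldl stepB (none, 0, 0)).2.2 ↔
      ∃ x c : Int, 0 ≤ x ∧ x ≤ c ∧ c < (l.length : Int) ∧ m = c - x + 1 ∧ constSegI l x c))

lemma pyGetD_append_lt (l : List Int) (v k : Int) (h0 : 0 ≤ k) (h1 : k < (l.length : Int)) :
    PySem.List.pyGetD (l ++ [v]) k 0 = PySem.List.pyGetD l k 0 := by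
  rw [PySem.List.pyGetD_eq_getElem (xs := l ++ [v]) (i := k) (d := 0) h0 (by simp; omega),
      PySem.List.pyGetD_eq_getElem (xs := l) (i := k) (d := 0) h0 h1]
  exact List.getElem_append_left (by omega)

lemma pyGetD_append_len (l : List Int) (v : Int) :
    PySem.List.pyGetD (l ++ [v]) (l.length : Int) 0 = v := by
  rw [PySem.List.pyGetD_eq_getElem (xs := l ++ [v]) (i := (l.length : Int)) (d := 0)
      (by omega) (by simp)]
  simp

lemma getLast?_eq_pyGetD (l : List Int) (h : l ≠ []) :
    l.getLast? = some (PySem.List.pyGetD l ((l.length : Int) - 1) 0) := by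
  have hlen : 0 < l.length := List.length_pos_iff.mpr h
  rw [PySem.List.pyGetD_eq_getElem (xs := l) (i := (l.length : Int) - 1) (d := 0)
      (by omega) (by omega)]
  have h2 : l.length - 1 = ((l.length : Int) - 1).toNat := by omega
  rw [List.getLast?_eq_getElem?, h2, List.getElem?_eq_getElem (by omega)]

lemma constSegI_append_lt (l : List Int) (v x c : Int) (h0 : 0 ≤ x) (hc : c < (l.length : Int)) :
    constSegI (l ++ [v]) x c ↔ constSegI l x c := by
  unfold constSegI
  constructor
  · intro h k h1 h2
    rw [← pyGetD_append_lt l v k (by omega) (by omega),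
        ← pyGetD_append_lt l v x (by omega) (by omega)]
    exact h k h1 h2
  · intro h k h1 h2
    rw [pyGetD_append_lt l v k (by omega) (by omega),
        pyGetD_append_lt l v x (by omega) (by omega)]
    exact h k h1 h2

lemma constSegI_singleton (l' : List Int) (c : Int) : constSegI l' c c := by
  intro k h1 h2
  have hk : k = c := le_antisymm h2 h1
  rw [hk]

lemma invB_holds (l : List Int) : InvB l := by
  induction l using List.reverseRecOn with
  | nil =>
    refine ⟨rfl, le_rfl, le_rfl, ?_, ?_⟩
    · intro m hm
      simp only [List.foldl_nil, List.length_nil, Nat.cast_zero]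
      constructor
      · intro h; omega
      · rintro ⟨h1, -⟩; omega
    · intro m hm
      simp only [List.foldl_nil, List.length_nil, Nat.cast_zero]
      constructor
      · intro h; omega
      · rintro ⟨x, c, h1, h2, h3, -⟩; omega
  | append_singleton l v ih =>
    obtain ⟨hprev, hrun0, hbest0, hrun, hbest⟩ := ih
    have hfold : (l ++ [v]).foldl stepB (none, 0, 0) = stepB (l.foldl stepB (none, 0, 0)) v := by
      rw [List.foldl_append]; rfl
    set S := l.foldl stepB (none, 0, 0) with hS
    set L : Int := (l.length : Int) with hL
    have hlen' : (((l ++ [v]).length : Nat) : Int) = L + 1 := by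
      simp [hL]
    set run' : Int := if S.1 = some v then S.2.1 + 1 else 1 with hrun'def
    set best' : Int := if run' > S.2.2 then run' else S.2.2 with hbest'def
    have e2 : PySem.List.pyGetD (l ++ [v]) L 0 = v := by
      rw [hL]; exact pyGetD_append_len l v
    have hsuffix : ∀ m : Int, 1 ≤ m →
        (m ≤ run' ↔ m ≤ L + 1 ∧ constSegI (l ++ [v]) (L + 1 - m) L) := by
      intro m hm
      by_cases hm1 : m = 1
      · subst hm1
        constructor
        · intro _
          refine ⟨by omega, ?_⟩
          have e : L + 1 - 1 = L := by ring
          rw [e]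
          exact constSegI_singleton _ _
        · intro _
          rw [hrun'def]
          split_ifs <;> omega
      · have hm2 : 2 ≤ m := by omega
        by_cases hpv : S.1 = some v
        · -- l is nonempty and ends with v
          have hlv : l.getLast? = some v := by rw [← hprev]; exact hpv
          have hlne : l ≠ [] := by
            intro h; rw [h] at hlv; simp at hlv
          have hlastv : PySem.List.pyGetD l (L - 1) 0 = v := by
            have hgl := getLast?_eq_pyGetD l hlne
            rw [← hL] at hgl
            rw [hgl] at hlv
            exact Option.some.inj hlv
          have hrun'eq : run' = S.2.1 + 1 := by rw [hrun'def, if_pos hpv]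
          rw [hrun'eq]
          have hmain := hrun (m - 1) (by omega)
          constructor
          · intro hle
            have h1 : m - 1 ≤ S.2.1 := by omega
            obtain ⟨hb, hcs⟩ := hmain.mp h1
            refine ⟨by omega, ?_⟩
            have eidx : L - (m - 1) = L + 1 - m := by ring
            rw [eidx] at hcs
            have e1 : PySem.List.pyGetD (l ++ [v]) (L + 1 - m) 0 = PySem.List.pyGetD l (L + 1 - m) 0 :=
              pyGetD_append_lt l v (L + 1 - m) (by omega) (by omega)
            have hlm : PySem.List.pyGetD l (L - 1) 0 = PySem.List.pyGetD l (L + 1 - m) 0 :=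
              hcs (L - 1) (by omega) (by omega)
            intro k hk1 hk2
            rcases eq_or_lt_of_le hk2 with hkL | hklt
            · rw [hkL, e2, e1, ← hlastv]
              exact hlm
            · have ek : PySem.List.pyGetD (l ++ [v]) k 0 = PySem.List.pyGetD l k 0 :=
                pyGetD_append_lt l v k (by omega) (by omega)
              rw [ek, e1]
              exact hcs k (by omega) (by omega)
          · rintro ⟨hb, hcs⟩
            suffices h : m - 1 ≤ S.2.1 by omega
            apply hmain.mpr
            refine ⟨by omega, ?_⟩
            intro k hk1 hk2
            rw [← pyGetD_append_lt l v k (by omega) (by omega),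
                ← pyGetD_append_lt l v (L - (m - 1)) (by omega) (by omega)]
            have eidx : L - (m - 1) = L + 1 - m := by ring
            rw [eidx]
            exact hcs k (by omega) (by omega)
        · have hrun'eq : run' = 1 := by rw [hrun'def, if_neg hpv]
          rw [hrun'eq]
          constructor
          · intro h; exact absurd h (by omega)
          · rintro ⟨hb, hcs⟩
            exfalso
            have hL1 : 1 ≤ L := by omega
            have hlne : l ≠ [] := by
              intro h; rw [h] at hL; simp at hL; omega
            have hgl := getLast?_eq_pyGetD l hlne
            rw [← hL] at hgl
            have c1 := hcs (L - 1) (by omega) (by omega)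
            have c2 := hcs L (by omega) (le_refl L)
            have e1 : PySem.List.pyGetD (l ++ [v]) (L - 1) 0 = PySem.List.pyGetD l (L - 1) 0 :=
              pyGetD_append_lt l v (L - 1) (by omega) (by omega)
            rw [e1] at c1
            rw [e2] at c2
            apply hpv
            rw [hprev, hgl, c1.trans c2.symm]
    have hrun'0 : 0 ≤ run' := by rw [hrun'def]; split_ifs <;> omega
    have hbest'0 : 0 ≤ best' := by rw [hbest'def]; split_ifs <;> omega
    have hbestchar : ∀ m : Int, 1 ≤ m → (m ≤ best' ↔
        ∃ x c : Int, 0 ≤ x ∧ x ≤ c ∧ c < L + 1 ∧ m = c - x + 1 ∧ constSegI (l ++ [v]) x c) := by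
      intro m hm
      have hsplit : m ≤ best' ↔ (m ≤ run' ∨ m ≤ S.2.2) := by
        rw [hbest'def]; split_ifs <;> omega
      rw [hsplit]
      constructor
      · rintro (h | h)
        · obtain ⟨hb, hcs⟩ := (hsuffix m hm).mp h
          exact ⟨L + 1 - m, L, by omega, by omega, by omega, by ring, hcs⟩
        · obtain ⟨x, c, h1, h2, h3, h4, h5⟩ := (hbest m hm).mp h
          exact ⟨x, c, h1, h2, by omega, h4,
            (constSegI_append_lt l v x c h1 (by omega)).mpr h5⟩
      · rintro ⟨x, c, h1, h2, h3, h4, h5⟩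
        by_cases hcL : c < L
        · right
          exact (hbest m hm).mpr ⟨x, c, h1, h2, by omega, h4,
            (constSegI_append_lt l v x c h1 (by omega)).mp h5⟩
        · left
          have hc : c = L := by omega
          have hx : x = L + 1 - m := by omega
          apply (hsuffix m hm).mpr
          refine ⟨by omega, ?_⟩
          rw [← hx, ← hc]
          exact h5
    have hc1 : (stepB S v).1 = some v := rfl
    have hc2 : (stepB S v).2.1 = run' := by rw [hrun'def]; rfl
    have hc3 : (stepB S v).2.2 = best' := by rw [hbest'def, hrun'def]; rfl
    refine ⟨?_, ?_, ?_, ?_, ?_⟩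
    · rw [hfold, hc1, List.getLast?_append]
      simp
    · rw [hfold, hc2]; exact hrun'0
    · rw [hfold, hc3]; exact hbest'0
    · intro m hm
      rw [hfold, hc2, hlen']
      have e : L + 1 - 1 = L := by ring
      rw [e]
      exact hsuffix m hm
    · intro m hm
      rw [hfold, hc3, hlen']
      exact hbestchar m hm

lemma B_iff (l : List Int) (n : Int) :
    hayMesetaDeLong_alt l n = true ↔
      ∃ x c : Int, 0 ≤ x ∧ x ≤ c ∧ c < (l.length : Int) ∧ n = c - x + 1 ∧ constSegI l x c := by
  obtain ⟨-, -, -, -, hbest⟩ := invB_holds l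
  unfold hayMesetaDeLong_alt
  simp only [decide_eq_true_eq]
  constructor
  · rintro ⟨hn1, hnb⟩
    exact (hbest n hn1).mp hnb
  · rintro ⟨x, c, h1, h2, h3, h4, h5⟩
    have hn1 : 1 ≤ n := by omega
    exact ⟨hn1, (hbest n hn1).mpr ⟨x, c, h1, h2, h3, h4, h5⟩⟩

-- ===== VERDICT (by name: the statement is the Claim_ definition above) =====
theorem hayMesetaDeLong_spec : Claim_equal_hayMesetaDeLong := by
  intro l n _
  unfold Spec_hayMesetaDeLong
  have h := (A_iff l n).trans (B_iff l n).symm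
  exact Bool.eq_iff_iff.mpr h
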